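-- pv_equiv track=rewrite | github.com/Kryxzort/GuiSirSquirrelAssistant | all data/src/common.py | proximity_check_fuse
-- ===== SOURCE A (Python) =====
-- def proximity_check_fuse(list1, list2, x_threshold ,threshold):
--     close_pairs = set()  # To store pairs of coordinates meeting the criteria
--     for coord1 in list1:
--         for coord2 in list2:
--             x_difference = abs(coord1[0] - coord2[0])
--             if x_difference < x_threshold:  # Check if x values are the same
--                 y_difference = abs(coord1[1] - coord2[1])
--                 if y_difference < threshold:  # Check if y difference is within the threshold
--                     close_pairs.add(coord1)
--     return close_pairs
-- ===== SOURCE B (Python) =====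
-- def proximity_check_fuse(list1, list2, x_threshold, threshold):
--     # Bucket list2 by x // x_threshold: a match needs |dx| < x_threshold, so only
--     # the 3 neighbouring buckets of a point can contain a partner.
--     if x_threshold <= 0:
--         return set()
--     buckets = {}
--     for x2, y2 in list2:
--         buckets.setdefault(x2 // x_threshold, []).append((x2, y2))
--     close_pairs = set()
--     for x1, y1 in list1:
--         k = x1 // x_threshold
--         candidates = buckets.get(k - 1, []) + buckets.get(k, []) + buckets.get(k + 1, [])
--         if any(abs(x1 - x2) < x_threshold and abs(y1 - y2) < threshold
--                for (x2, y2) in candidates):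
--             close_pairs.add((x1, y1))
--     return close_pairs
-- ===== Notes on version B (the rewrite author's own statement) =====
-- stated objective: faster
-- what changed: Replaces the all-pairs nested scan with a spatial hash: list2 is bucketed once by x // x_threshold and each list1 point tests only the 3 adjacent buckets for a partner.
import Mathlib
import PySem

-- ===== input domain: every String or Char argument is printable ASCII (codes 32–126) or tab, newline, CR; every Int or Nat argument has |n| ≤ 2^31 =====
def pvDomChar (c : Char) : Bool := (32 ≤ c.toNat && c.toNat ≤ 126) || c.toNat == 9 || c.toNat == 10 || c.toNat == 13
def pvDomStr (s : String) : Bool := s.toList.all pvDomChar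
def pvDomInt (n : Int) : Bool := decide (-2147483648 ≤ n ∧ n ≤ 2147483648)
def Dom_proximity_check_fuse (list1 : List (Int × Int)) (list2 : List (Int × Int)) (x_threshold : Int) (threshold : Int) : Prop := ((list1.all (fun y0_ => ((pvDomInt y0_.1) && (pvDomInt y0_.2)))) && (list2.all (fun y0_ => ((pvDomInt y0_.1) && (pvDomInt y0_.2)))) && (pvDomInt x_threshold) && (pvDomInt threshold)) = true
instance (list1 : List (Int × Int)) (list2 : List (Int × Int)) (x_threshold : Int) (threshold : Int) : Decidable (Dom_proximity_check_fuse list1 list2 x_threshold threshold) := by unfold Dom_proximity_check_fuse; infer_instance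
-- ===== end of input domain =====

-- B replaces A's all-pairs scan with a spatial hash on x // x_threshold (faster: each
-- list1 point checks only 3 buckets of list2 instead of all of list2).

-- ===== PORT A =====
def proximity_check_fuse (list1 : List (Int × Int)) (list2 : List (Int × Int)) (x_threshold : Int) (threshold : Int) : List (Int × Int) :=
  list1.foldl (fun close_pairs coord1 =>
    list2.foldl (fun close_pairs coord2 =>
      if |coord1.1 - coord2.1| < x_threshold then
        if |coord1.2 - coord2.2| < threshold then
          PySem.Set.add close_pairs coord1
        else close_pairs
      else close_pairs) close_pairs) PySem.Set.empty

-- ===== PORT B =====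
def proximity_check_fuse_alt (list1 : List (Int × Int)) (list2 : List (Int × Int)) (x_threshold : Int) (threshold : Int) : List (Int × Int) :=
  if x_threshold ≤ 0 then PySem.Set.empty
  else
    let buckets : PySem.Dict Int (List (Int × Int)) :=
      list2.foldl (fun d p =>
        d.insert (PySem.Int.floordiv p.1 x_threshold)
                 (d.getD (PySem.Int.floordiv p.1 x_threshold) [] ++ [p])) PySem.Dict.empty
    list1.foldl (fun close_pairs c1 =>
      let k := PySem.Int.floordiv c1.1 x_threshold
      let candidates := buckets.getD (k - 1) [] ++ buckets.getD k [] ++ buckets.getD (k + 1) []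
      if candidates.any (fun c2 =>
          decide (|c1.1 - c2.1| < x_threshold) && decide (|c1.2 - c2.2| < threshold)) then
        PySem.Set.add close_pairs c1
      else close_pairs) PySem.Set.empty

-- ===== PRECONDITION & SPEC =====
def Spec_proximity_check_fuse (list1 : List (Int × Int)) (list2 : List (Int × Int)) (x_threshold : Int) (threshold : Int) (out : List (Int × Int)) : Prop := out = proximity_check_fuse_alt list1 list2 x_threshold threshold
instance (list1 : List (Int × Int)) (list2 : List (Int × Int)) (x_threshold : Int) (threshold : Int) (out : List (Int × Int)) : Decidable (Spec_proximity_check_fuse list1 list2 x_threshold threshold out) := by unfold Spec_proximity_check_fuse; infer_instance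

-- ===== CLAIM (what is proved, stated in full; the proofs are below) =====
def Claim_equal_proximity_check_fuse : Prop := ∀ (list1 : List (Int × Int)) (list2 : List (Int × Int)) (x_threshold : Int) (threshold : Int), Dom_proximity_check_fuse list1 list2 x_threshold threshold → Spec_proximity_check_fuse list1 list2 x_threshold threshold (proximity_check_fuse list1 list2 x_threshold threshold)

-- ===== LEMMAS AND PROOFS =====

-- the match predicate both programs test
def pvMatch (x_threshold threshold : Int) (c1 c2 : Int × Int) : Bool :=
  decide (|c1.1 - c2.1| < x_threshold) && decide (|c1.2 - c2.2| < threshold)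

-- A's inner loop over list2 collapses to "add once if any partner matches"
theorem innerA (l2 : List (Int × Int)) (xt t : Int) (c1 : Int × Int) (s : PySem.Set (Int × Int)) :
    l2.foldl (fun cp c2 =>
      if |c1.1 - c2.1| < xt then
        if |c1.2 - c2.2| < t then PySem.Set.add cp c1 else cp
      else cp) s
    = if l2.any (pvMatch xt t c1) then PySem.Set.add s c1 else s := by
  induction l2 generalizing s with
  | nil => simp
  | cons q t2 ih =>
    simp only [List.foldl_cons, List.any_cons, ih]
    by_cases h1 : |c1.1 - q.1| < xt
    · by_cases h2y : |c1.2 - q.2| < t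
      · simp only [if_pos h1, if_pos h2y, pvMatch, decide_eq_true h1, decide_eq_true h2y,
          Bool.true_and, Bool.true_or, if_pos]
        rcases Bool.eq_false_or_eq_true (t2.any (pvMatch xt t c1)) with ha | ha
        · simp [ha]
        · simp [ha, PySem.Set.add]
      · simp only [if_pos h1, if_neg h2y, pvMatch, decide_eq_false h2y, Bool.and_false,
          Bool.false_or]
    · simp only [if_neg h1, pvMatch, decide_eq_false h1, Bool.false_and, Bool.false_or]

-- bucket characterization: membership in the built dict's bucket k
theorem bucket_mem (l2 : List (Int × Int)) (xt : Int) (k : Int) (p : Int × Int) :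
    (p ∈ (l2.foldl (fun d q =>
        d.insert (PySem.Int.floordiv q.1 xt)
                 (d.getD (PySem.Int.floordiv q.1 xt) [] ++ [q])) PySem.Dict.empty).getD k [])
    ↔ (p ∈ l2 ∧ PySem.Int.floordiv p.1 xt = k) := by
  suffices h : ∀ (d : PySem.Dict Int (List (Int × Int))),
      (∀ k' p', p' ∈ d.getD k' [] → PySem.Int.floordiv p'.1 xt = k') →
      ∀ k' p', (p' ∈ (l2.foldl (fun d q =>
          d.insert (PySem.Int.floordiv q.1 xt)
                   (d.getD (PySem.Int.floordiv q.1 xt) [] ++ [q])) d).getD k' [])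
        ↔ (p' ∈ d.getD k' [] ∨ (p' ∈ l2 ∧ PySem.Int.floordiv p'.1 xt = k')) by
    have := h PySem.Dict.empty (by intro k' p' hp; simp [PySem.Dict.getD_empty] at hp) k p
    simpa using this
  induction l2 with
  | nil => intro d hd k' p'; simp
  | cons q t2 ih =>
    intro d hd k' p'
    simp only [List.foldl_cons]
    rw [ih]
    · simp only [PySem.Dict.getD_insert, List.mem_cons]
      by_cases hk : k' = PySem.Int.floordiv q.1 xt
      · subst hk
        simp only [if_true, List.mem_append, List.mem_singleton]
        constructor
        · rintro (((h | rfl) | h))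
          · exact Or.inl h
          · exact Or.inr ⟨Or.inl rfl, rfl⟩
          · exact Or.inr ⟨Or.inr h.1, h.2⟩
        · rintro (h | ⟨rfl | hmem, hkey⟩)
          · exact Or.inl (Or.inl h)
          · exact Or.inl (Or.inr rfl)
          · exact Or.inr ⟨hmem, hkey⟩
      · simp only [if_neg hk]
        constructor
        · rintro (h | h)
          · exact Or.inl h
          · exact Or.inr ⟨Or.inr h.1, h.2⟩
        · rintro (h | ⟨rfl | hmem, hkey⟩)
          · exact Or.inl h
          · exact absurd hkey.symm hk
          · exact Or.inr ⟨hmem, hkey⟩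
    · intro k'' p'' hp
      simp only [PySem.Dict.getD_insert] at hp
      by_cases hk : k'' = PySem.Int.floordiv q.1 xt
      · subst hk
        simp only [if_true, List.mem_append, List.mem_singleton] at hp
        rcases hp with hp | rfl
        · exact hd _ _ hp
        · rfl
      · rw [if_neg hk] at hp
        exact hd _ _ hp

-- close-in-x points fall into the 3 neighbouring buckets
theorem key_range (xt x1 x2 : Int) (hxt : 0 < xt) (h : |x1 - x2| < xt) :
    PySem.Int.floordiv x2 xt = PySem.Int.floordiv x1 xt - 1 ∨
    PySem.Int.floordiv x2 xt = PySem.Int.floordiv x1 xt ∨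
    PySem.Int.floordiv x2 xt = PySem.Int.floordiv x1 xt + 1 := by
  have e1 := PySem.Int.floordiv_mul_add_mod x1 xt
  have e2 := PySem.Int.floordiv_mul_add_mod x2 xt
  have r1a := PySem.Int.mod_nonneg x1 hxt
  have r1b := PySem.Int.mod_lt x1 hxt
  have r2a := PySem.Int.mod_nonneg x2 hxt
  have r2b := PySem.Int.mod_lt x2 hxt
  set k1 := PySem.Int.floordiv x1 xt
  set k2 := PySem.Int.floordiv x2 xt
  rw [abs_lt] at h
  rcases lt_trichotomy k2 k1 with hlt | heq | hgt
  · left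
    by_contra hne
    have h2 : k2 ≤ k1 - 2 := by omega
    have : k2 * xt ≤ (k1 - 2) * xt := by
      exact mul_le_mul_of_nonneg_right h2 (le_of_lt hxt)
    nlinarith [PySem.Int.mod_nonneg x1 hxt, PySem.Int.mod_lt x2 hxt]
  · right; left; exact heq
  · right; right
    by_contra hne
    have h2 : k1 + 2 ≤ k2 := by omega
    have : (k1 + 2) * xt ≤ k2 * xt := by
      exact mul_le_mul_of_nonneg_right h2 (le_of_lt hxt)
    nlinarith [PySem.Int.mod_nonneg x2 hxt, PySem.Int.mod_lt x1 hxt]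

-- the any over 3 buckets equals the any over all of list2
theorem any_buckets (l2 : List (Int × Int)) (xt t : Int) (hxt : 0 < xt) (c1 : Int × Int) :
    ((l2.foldl (fun (d : PySem.Dict Int (List (Int × Int))) q =>
        d.insert (PySem.Int.floordiv q.1 xt)
                 (d.getD (PySem.Int.floordiv q.1 xt) [] ++ [q])) PySem.Dict.empty).getD (PySem.Int.floordiv c1.1 xt - 1) [] ++
     (l2.foldl (fun (d : PySem.Dict Int (List (Int × Int))) q =>
        d.insert (PySem.Int.floordiv q.1 xt)
                 (d.getD (PySem.Int.floordiv q.1 xt) [] ++ [q])) PySem.Dict.empty).getD (PySem.Int.floordiv c1.1 xt) [] ++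
     (l2.foldl (fun (d : PySem.Dict Int (List (Int × Int))) q =>
        d.insert (PySem.Int.floordiv q.1 xt)
                 (d.getD (PySem.Int.floordiv q.1 xt) [] ++ [q])) PySem.Dict.empty).getD (PySem.Int.floordiv c1.1 xt + 1) []).any
      (pvMatch xt t c1)
    = l2.any (pvMatch xt t c1) := by
  rcases Bool.eq_false_or_eq_true (l2.any (pvMatch xt t c1)) with hA | hA
  · rw [hA]
    rw [List.any_eq_true] at hA ⊢
    obtain ⟨p, hp, hm⟩ := hA
    refine ⟨p, ?_, hm⟩
    have hx : |c1.1 - p.1| < xt := by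
      have := hm
      simp [pvMatch] at this
      exact this.1
    have hx' : |p.1 - c1.1| < xt := by rwa [abs_sub_comm]
    simp only [List.mem_append, bucket_mem]
    rcases key_range xt c1.1 p.1 hxt hx with h | h | h
    · exact Or.inl (Or.inl ⟨hp, h⟩)
    · exact Or.inl (Or.inr ⟨hp, h⟩)
    · exact Or.inr ⟨hp, h⟩
  · rw [hA]
    rw [List.any_eq_false] at hA ⊢
    intro p hp
    simp only [List.mem_append, bucket_mem] at hp
    rcases hp with (⟨h, _⟩ | ⟨h, _⟩) | ⟨h, _⟩ <;> exact hA p h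

-- when x_threshold ≤ 0 nothing matches, so A's folds leave the set empty
theorem aux_zero (list1 list2 : List (Int × Int)) (xt threshold : Int) (hxt : xt ≤ 0)
    (s : PySem.Set (Int × Int)) :
    list1.foldl (fun close_pairs coord1 =>
      list2.foldl (fun close_pairs coord2 =>
        if |coord1.1 - coord2.1| < xt then
          if |coord1.2 - coord2.2| < threshold then PySem.Set.add close_pairs coord1
          else close_pairs
        else close_pairs) close_pairs) s = s := by
  induction list1 generalizing s with
  | nil => rfl
  | cons c1 t1 ih =>
    rw [List.foldl_cons, innerA]
    have hfalse : list2.any (pvMatch xt threshold c1) = false := by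
      rw [List.any_eq_false]
      intro p _
      have hnl : ¬ |c1.1 - p.1| < xt :=
        fun hlt => absurd (lt_of_le_of_lt (abs_nonneg _) hlt) (not_lt.mpr hxt)
      simp [pvMatch, hnl]
    rw [hfalse, if_neg Bool.false_ne_true]
    exact ih s

-- ===== VERDICT (by name: the statement is the Claim_ definition above) =====
theorem proximity_check_fuse_spec : Claim_equal_proximity_check_fuse := by
  intro list1 list2 xt t hdom
  clear hdom
  unfold Spec_proximity_check_fuse
  by_cases hxt : xt ≤ 0
  · unfold proximity_check_fuse proximity_check_fuse_alt
    rw [if_pos hxt]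
    exact aux_zero list1 list2 xt t hxt PySem.Set.empty
  · unfold proximity_check_fuse proximity_check_fuse_alt
    rw [if_neg hxt]
    show _ = list1.foldl (fun close_pairs c1 =>
      if (((list2.foldl (fun (d : PySem.Dict Int (List (Int × Int))) q =>
              d.insert (PySem.Int.floordiv q.1 xt)
                       (d.getD (PySem.Int.floordiv q.1 xt) [] ++ [q])) PySem.Dict.empty).getD
              (PySem.Int.floordiv c1.1 xt - 1) [] ++
            (list2.foldl (fun (d : PySem.Dict Int (List (Int × Int))) q =>
              d.insert (PySem.Int.floordiv q.1 xt)
                       (d.getD (PySem.Int.floordiv q.1 xt) [] ++ [q])) PySem.Dict.empty).getD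
              (PySem.Int.floordiv c1.1 xt) [] ++
            (list2.foldl (fun (d : PySem.Dict Int (List (Int × Int))) q =>
              d.insert (PySem.Int.floordiv q.1 xt)
                       (d.getD (PySem.Int.floordiv q.1 xt) [] ++ [q])) PySem.Dict.empty).getD
              (PySem.Int.floordiv c1.1 xt + 1) []).any
          (fun c2 => decide (|c1.1 - c2.1| < xt) && decide (|c1.2 - c2.2| < t)))
      then PySem.Set.add close_pairs c1 else close_pairs) PySem.Set.empty
    apply PySem.List.foldl_congr_mem
    intro s c1 _
    rw [innerA]
    rw [show (fun c2 => decide (|c1.1 - c2.1| < xt) && decide (|c1.2 - c2.2| < t))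
        = pvMatch xt t c1 from rfl]
    rw [any_buckets list2 xt t (lt_of_not_ge hxt) c1]
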